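-- pv_equiv track=rewrite | github.com/ymcx/AdventOfCode | 2025/src/day12A.py | do_they_fit
-- ===== SOURCE A (Python) =====
-- import copy
--
-- def do_they_fit(width,length,region33,region43,region44,region53):
--     region33 = copy.deepcopy(region33)
--     region43 = copy.deepcopy(region43)
--     region44 = copy.deepcopy(region44)
--     region53 = copy.deepcopy(region53)
--
--     ww,ll=0,3
--
--     while region33:
--         for _ in range(region33.pop()):
--             ww += 3
--             if ww>width:
--                 ww = 3
--                 ll += 3
--
--     while region43:
--         for _ in range(region43.pop()):
--             ww += 4
--             if ww>width:
--                 ww = 4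
--                 ll += 3
--
--     while region53:
--         for _ in range(region53.pop()):
--             ww += 5
--             if ww>width:
--                 ww = 5
--                 ll += 3
--
--
--     while region44:
--         ll+=1
--         for _ in range(region44.pop()):
--             ww += 4
--             if ww>width:
--                 ww = 4
--                 ll += 4
--
--
--
--     return ww <= width and ll <= length
-- ===== SOURCE B (Python) =====
-- def do_they_fit(width, length, region33, region43, region44, region53):
--     def place(ww, ll, w, n, step):
--         # closed-form placement of n items of width w, row step 'step'
--         if n <= 0:
--             return ww, ll
--         r = (width - ww) // w          # items still fitting in the current row
--         if n <= r:
--             return ww + n * w, ll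
--         m = n - max(r, 0)              # items needing new rows
--         c = width // w                 # items per fresh row
--         if c <= 0:
--             return w, ll + step * m
--         rows = -(-m // c)              # ceil(m / c)
--         return w * (m - (rows - 1) * c), ll + step * rows
--
--     ww, ll = 0, 3
--     ww, ll = place(ww, ll, 3, sum(max(x, 0) for x in region33), 3)
--     ww, ll = place(ww, ll, 4, sum(max(x, 0) for x in region43), 3)
--     ww, ll = place(ww, ll, 5, sum(max(x, 0) for x in region53), 3)
--     ll += len(region44)
--     ww, ll = place(ww, ll, 4, sum(max(x, 0) for x in region44), 4)
--     return ww <= width and ll <= length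
-- ===== Notes on version B (the rewrite author's own statement) =====
-- stated objective: faster
-- what changed: Replaces the unit-by-unit packing simulation with closed-form floor/ceil-division arithmetic: each region's total item count is summed once and the rows it fills (and the final row offset) are computed directly, instead of iterating once per item.
import Mathlib
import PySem

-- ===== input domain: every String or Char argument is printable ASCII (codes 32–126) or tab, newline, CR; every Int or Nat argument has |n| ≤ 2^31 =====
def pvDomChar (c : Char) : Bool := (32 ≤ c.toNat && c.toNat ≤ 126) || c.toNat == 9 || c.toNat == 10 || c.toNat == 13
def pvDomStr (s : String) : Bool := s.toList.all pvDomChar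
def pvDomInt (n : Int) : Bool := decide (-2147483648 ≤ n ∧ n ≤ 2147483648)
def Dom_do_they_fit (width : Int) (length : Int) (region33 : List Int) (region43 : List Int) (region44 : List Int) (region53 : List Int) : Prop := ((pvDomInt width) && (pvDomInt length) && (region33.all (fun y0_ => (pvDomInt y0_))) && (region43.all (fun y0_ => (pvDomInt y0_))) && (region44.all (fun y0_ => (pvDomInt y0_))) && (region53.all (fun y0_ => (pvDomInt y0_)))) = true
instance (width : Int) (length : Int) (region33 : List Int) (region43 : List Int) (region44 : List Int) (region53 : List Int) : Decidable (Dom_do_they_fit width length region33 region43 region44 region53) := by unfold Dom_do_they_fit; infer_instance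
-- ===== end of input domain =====

-- B: closed-form division/modulo arithmetic per region instead of per-item simulation (asymptotically faster).
-- B replaces the unit-by-unit packing simulation with closed-form division arithmetic per region: O(list length) arithmetic instead of one loop iteration per packed item.
-- ===== PORT A =====
-- the inner 'ww += w; if ww > width: ww = w; ll += step' step of every loop
def pvStep (width w step : Int) (st : Int × Int) : Int × Int :=
  let ww := st.1 + w
  if ww > width then (w, st.2 + step) else (ww, st.2)

-- 'while region: for _ in range(region.pop()): ...' — pop() consumes the list from the end,
-- so the elements are processed right-to-left (foldr); range(n) repeats the step n times.
def pvRegionA (width w step : Int) (items : List Int) (st : Int × Int) : Int × Int :=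
  items.foldr (fun n st => (PySem.List.pyRange 0 n 1).foldl (fun st _ => pvStep width w step st) st) st

-- the region44 loop additionally does 'll += 1' for every popped element, before its inner loop
def pvRegion44A (width : Int) (items : List Int) (st : Int × Int) : Int × Int :=
  items.foldr (fun n st => (PySem.List.pyRange 0 n 1).foldl (fun st _ => pvStep width 4 4 st) (st.1, st.2 + 1)) st

def do_they_fit (width : Int) (length : Int) (region33 : List Int) (region43 : List Int) (region44 : List Int) (region53 : List Int) : Bool :=
  -- ww, ll = 0, 3; then the four while-loops in A's order; finally 'ww <= width and ll <= length'
  let st := pvRegion44A width region44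
      (pvRegionA width 5 3 region53 (pvRegionA width 4 3 region43 (pvRegionA width 3 3 region33 ((0 : Int), (3 : Int)))))
  decide (st.1 ≤ width) && decide (st.2 ≤ length)

-- ===== PORT B =====
-- sum(max(x, 0) for x in l)
def pvSumPos (l : List Int) : Int := l.foldl (fun a x => a + max x 0) 0

-- closed-form placement of n items of width w with row advance 'step' (B's 'place')
def pvPlace (width w step n : Int) (st : Int × Int) : Int × Int :=
  if n ≤ 0 then st
  else
    let r := PySem.Int.floordiv (width - st.1) w   -- items still fitting in the current row
    if n ≤ r then (st.1 + n * w, st.2)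
    else
      let m := n - max r 0                          -- items needing new rows
      let c := PySem.Int.floordiv width w           -- items per fresh row
      if c ≤ 0 then (w, st.2 + step * m)
      else
        let rows := -(PySem.Int.floordiv (-m) c)    -- ceil(m / c)
        (w * (m - (rows - 1) * c), st.2 + step * rows)

def do_they_fit_alt (width : Int) (length : Int) (region33 : List Int) (region43 : List Int) (region44 : List Int) (region53 : List Int) : Bool :=
  let st := pvPlace width 3 3 (pvSumPos region33) ((0 : Int), (3 : Int))
  let st := pvPlace width 4 3 (pvSumPos region43) st
  let st := pvPlace width 5 3 (pvSumPos region53) st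
  let st := pvPlace width 4 4 (pvSumPos region44) (st.1, st.2 + region44.length)
  decide (st.1 ≤ width) && decide (st.2 ≤ length)
-- ===== PRECONDITION & SPEC =====
def Spec_do_they_fit (width : Int) (length : Int) (region33 : List Int) (region43 : List Int) (region44 : List Int) (region53 : List Int) (out : Bool) : Prop := out = do_they_fit_alt width length region33 region43 region44 region53
instance (width : Int) (length : Int) (region33 : List Int) (region43 : List Int) (region44 : List Int) (region53 : List Int) (out : Bool) : Decidable (Spec_do_they_fit width length region33 region43 region44 region53 out) := by unfold Spec_do_they_fit; infer_instance

-- ===== CLAIM (what is proved, stated in full; the proofs are below) =====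
def Claim_equal_do_they_fit : Prop := ∀ (width : Int) (length : Int) (region33 : List Int) (region43 : List Int) (region44 : List Int) (region53 : List Int), Dom_do_they_fit width length region33 region43 region44 region53 → Spec_do_they_fit width length region33 region43 region44 region53 (do_they_fit width length region33 region43 region44 region53)


-- ===== LEMMAS AND PROOFS =====

lemma ceil_one {c : Int} (hc : 0 < c) : -(PySem.Int.floordiv (-1) c) = 1 := by
  refine (PySem.Int.neg_floordiv_neg_eq_iff_of_pos hc).mpr ⟨by nlinarith, by nlinarith⟩

lemma ceil_char {m c : Int} (hc : 0 < c) :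
    (-(PySem.Int.floordiv (-m) c) - 1) * c < m ∧ m ≤ -(PySem.Int.floordiv (-m) c) * c :=
  (PySem.Int.neg_floordiv_neg_eq_iff_of_pos hc).mp rfl

lemma ceil_succ_full {m c : Int} (hc : 0 < c) (hm : m = -(PySem.Int.floordiv (-m) c) * c) :
    -(PySem.Int.floordiv (-(m + 1)) c) = -(PySem.Int.floordiv (-m) c) + 1 := by
  refine (PySem.Int.neg_floordiv_neg_eq_iff_of_pos hc).mpr ⟨by nlinarith, by nlinarith⟩

lemma ceil_succ_part {m c : Int} (hc : 0 < c) (hm : m + 1 ≤ -(PySem.Int.floordiv (-m) c) * c) :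
    -(PySem.Int.floordiv (-(m + 1)) c) = -(PySem.Int.floordiv (-m) c) := by
  have h := ceil_char (m := m) hc
  refine (PySem.Int.neg_floordiv_neg_eq_iff_of_pos hc).mpr ⟨by nlinarith, by nlinarith⟩

lemma place_succ_3 (width step : Int) (n : Nat) (ww ll : Int) :
    pvStep width 3 step (pvPlace width 3 step (n : Int) (ww, ll)) = pvPlace width 3 step ((n : Int) + 1) (ww, ll) := by
  have h3 : ∀ a : Int, PySem.Int.floordiv a 3 = a / 3 := fun a => PySem.Int.floordiv_eq_ediv_of_pos (by norm_num)
  simp only [pvPlace, pvStep, h3]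
  split_ifs <;> (try dsimp only at *) <;>
    first
    | (simp only [Prod.mk.injEq] at *
       constructor <;> first | trivial | omega | (ring_nf; done) | (ring_nf; omega))
    | (rw [show ((n:ℤ) + 1 - max ((width - ww) / 3) 0) = 1 from by omega]
       try rw [ceil_one (show (0:ℤ) < width / 3 from by omega)]
       have g1 : ((1:ℤ) - 1) * (width / 3) = 0 := by ring
       have g2 : step * (1:ℤ) = step := by ring
       simp only [Prod.mk.injEq] at *
       constructor <;> first | trivial | omega)
    | (have hc' : (0:ℤ) < width / 3 := by omega
       rw [show ((n:ℤ) + 1 - max ((width - ww) / 3) 0) = ((n:ℤ) - max ((width - ww) / 3) 0) + 1 from by ring]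
       have hch := ceil_char (m := ((n:ℤ) - max ((width - ww) / 3) 0)) hc'
       have e1 : (-PySem.Int.floordiv (-((n:ℤ) - max ((width - ww) / 3) 0)) (width / 3) - 1) * (width / 3)
           = -PySem.Int.floordiv (-((n:ℤ) - max ((width - ww) / 3) 0)) (width / 3) * (width / 3) - width / 3 := by ring
       by_cases hful : ((n:ℤ) - max ((width - ww) / 3) 0) = -PySem.Int.floordiv (-((n:ℤ) - max ((width - ww) / 3) 0)) (width / 3) * (width / 3)
       · rw [ceil_succ_full hc' hful]
         have e2 : (-PySem.Int.floordiv (-((n:ℤ) - max ((width - ww) / 3) 0)) (width / 3) + 1 - 1) * (width / 3)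
             = -PySem.Int.floordiv (-((n:ℤ) - max ((width - ww) / 3) 0)) (width / 3) * (width / 3) := by ring
         have e3 : step * (-PySem.Int.floordiv (-((n:ℤ) - max ((width - ww) / 3) 0)) (width / 3) + 1)
             = step * -PySem.Int.floordiv (-((n:ℤ) - max ((width - ww) / 3) 0)) (width / 3) + step := by ring
         simp only [Prod.mk.injEq] at *
         constructor <;> first | trivial | omega
       · have hpart : ((n:ℤ) - max ((width - ww) / 3) 0) + 1 ≤ -PySem.Int.floordiv (-((n:ℤ) - max ((width - ww) / 3) 0)) (width / 3) * (width / 3) := by omega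
         rw [ceil_succ_part hc' hpart]
         simp only [Prod.mk.injEq] at *
         constructor <;> first | trivial | omega)

lemma place_succ_4 (width step : Int) (n : Nat) (ww ll : Int) :
    pvStep width 4 step (pvPlace width 4 step (n : Int) (ww, ll)) = pvPlace width 4 step ((n : Int) + 1) (ww, ll) := by
  have h3 : ∀ a : Int, PySem.Int.floordiv a 4 = a / 4 := fun a => PySem.Int.floordiv_eq_ediv_of_pos (by norm_num)
  simp only [pvPlace, pvStep, h3]
  split_ifs <;> (try dsimp only at *) <;>
    first
    | (simp only [Prod.mk.injEq] at *
       constructor <;> first | trivial | omega | (ring_nf; done) | (ring_nf; omega))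
    | (rw [show ((n:ℤ) + 1 - max ((width - ww) / 4) 0) = 1 from by omega]
       try rw [ceil_one (show (0:ℤ) < width / 4 from by omega)]
       have g1 : ((1:ℤ) - 1) * (width / 4) = 0 := by ring
       have g2 : step * (1:ℤ) = step := by ring
       simp only [Prod.mk.injEq] at *
       constructor <;> first | trivial | omega)
    | (have hc' : (0:ℤ) < width / 4 := by omega
       rw [show ((n:ℤ) + 1 - max ((width - ww) / 4) 0) = ((n:ℤ) - max ((width - ww) / 4) 0) + 1 from by ring]
       have hch := ceil_char (m := ((n:ℤ) - max ((width - ww) / 4) 0)) hc'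
       have e1 : (-PySem.Int.floordiv (-((n:ℤ) - max ((width - ww) / 4) 0)) (width / 4) - 1) * (width / 4)
           = -PySem.Int.floordiv (-((n:ℤ) - max ((width - ww) / 4) 0)) (width / 4) * (width / 4) - width / 4 := by ring
       by_cases hful : ((n:ℤ) - max ((width - ww) / 4) 0) = -PySem.Int.floordiv (-((n:ℤ) - max ((width - ww) / 4) 0)) (width / 4) * (width / 4)
       · rw [ceil_succ_full hc' hful]
         have e2 : (-PySem.Int.floordiv (-((n:ℤ) - max ((width - ww) / 4) 0)) (width / 4) + 1 - 1) * (width / 4)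
             = -PySem.Int.floordiv (-((n:ℤ) - max ((width - ww) / 4) 0)) (width / 4) * (width / 4) := by ring
         have e3 : step * (-PySem.Int.floordiv (-((n:ℤ) - max ((width - ww) / 4) 0)) (width / 4) + 1)
             = step * -PySem.Int.floordiv (-((n:ℤ) - max ((width - ww) / 4) 0)) (width / 4) + step := by ring
         simp only [Prod.mk.injEq] at *
         constructor <;> first | trivial | omega
       · have hpart : ((n:ℤ) - max ((width - ww) / 4) 0) + 1 ≤ -PySem.Int.floordiv (-((n:ℤ) - max ((width - ww) / 4) 0)) (width / 4) * (width / 4) := by omega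
         rw [ceil_succ_part hc' hpart]
         simp only [Prod.mk.injEq] at *
         constructor <;> first | trivial | omega)

lemma place_succ_5 (width step : Int) (n : Nat) (ww ll : Int) :
    pvStep width 5 step (pvPlace width 5 step (n : Int) (ww, ll)) = pvPlace width 5 step ((n : Int) + 1) (ww, ll) := by
  have h3 : ∀ a : Int, PySem.Int.floordiv a 5 = a / 5 := fun a => PySem.Int.floordiv_eq_ediv_of_pos (by norm_num)
  simp only [pvPlace, pvStep, h3]
  split_ifs <;> (try dsimp only at *) <;>
    first
    | (simp only [Prod.mk.injEq] at *
       constructor <;> first | trivial | omega | (ring_nf; done) | (ring_nf; omega))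
    | (rw [show ((n:ℤ) + 1 - max ((width - ww) / 5) 0) = 1 from by omega]
       try rw [ceil_one (show (0:ℤ) < width / 5 from by omega)]
       have g1 : ((1:ℤ) - 1) * (width / 5) = 0 := by ring
       have g2 : step * (1:ℤ) = step := by ring
       simp only [Prod.mk.injEq] at *
       constructor <;> first | trivial | omega)
    | (have hc' : (0:ℤ) < width / 5 := by omega
       rw [show ((n:ℤ) + 1 - max ((width - ww) / 5) 0) = ((n:ℤ) - max ((width - ww) / 5) 0) + 1 from by ring]
       have hch := ceil_char (m := ((n:ℤ) - max ((width - ww) / 5) 0)) hc'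
       have e1 : (-PySem.Int.floordiv (-((n:ℤ) - max ((width - ww) / 5) 0)) (width / 5) - 1) * (width / 5)
           = -PySem.Int.floordiv (-((n:ℤ) - max ((width - ww) / 5) 0)) (width / 5) * (width / 5) - width / 5 := by ring
       by_cases hful : ((n:ℤ) - max ((width - ww) / 5) 0) = -PySem.Int.floordiv (-((n:ℤ) - max ((width - ww) / 5) 0)) (width / 5) * (width / 5)
       · rw [ceil_succ_full hc' hful]
         have e2 : (-PySem.Int.floordiv (-((n:ℤ) - max ((width - ww) / 5) 0)) (width / 5) + 1 - 1) * (width / 5)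
             = -PySem.Int.floordiv (-((n:ℤ) - max ((width - ww) / 5) 0)) (width / 5) * (width / 5) := by ring
         have e3 : step * (-PySem.Int.floordiv (-((n:ℤ) - max ((width - ww) / 5) 0)) (width / 5) + 1)
             = step * -PySem.Int.floordiv (-((n:ℤ) - max ((width - ww) / 5) 0)) (width / 5) + step := by ring
         simp only [Prod.mk.injEq] at *
         constructor <;> first | trivial | omega
       · have hpart : ((n:ℤ) - max ((width - ww) / 5) 0) + 1 ≤ -PySem.Int.floordiv (-((n:ℤ) - max ((width - ww) / 5) 0)) (width / 5) * (width / 5) := by omega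
         rw [ceil_succ_part hc' hpart]
         simp only [Prod.mk.injEq] at *
         constructor <;> first | trivial | omega)

lemma foldl_const_iterate {α β : Type} (f : α → α) (l : List β) (st : α) :
    l.foldl (fun s _ => f s) st = f^[l.length] st := by
  induction l generalizing st with
  | nil => rfl
  | cons a l ih => simp [List.foldl_cons, ih, Function.iterate_succ_apply]

lemma iterate_place (width step w : Int) (hw : w = 3 ∨ w = 4 ∨ w = 5) (n : Nat) (st : Int × Int) :
    (pvStep width w step)^[n] st = pvPlace width w step (n : Int) st := by
  induction n generalizing st with
  | zero => simp [pvPlace]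
  | succ n ih =>
    obtain ⟨ww, ll⟩ := st
    rw [Function.iterate_succ_apply', ih]
    have h : pvStep width w step (pvPlace width w step (n : Int) (ww, ll))
        = pvPlace width w step ((n : Int) + 1) (ww, ll) := by
      rcases hw with h | h | h <;> subst h
      · exact place_succ_3 width step n ww ll
      · exact place_succ_4 width step n ww ll
      · exact place_succ_5 width step n ww ll
    rw [h]
    norm_cast

lemma regionA_cons (width w step a : Int) (l : List Int) (st : Int × Int) :
    pvRegionA width w step (a :: l) st
      = (PySem.List.pyRange 0 a 1).foldl (fun st _ => pvStep width w step st) (pvRegionA width w step l st) := rfl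

lemma regionA_iterate (width w step : Int) (l : List Int) (st : Int × Int) :
    pvRegionA width w step l st = (pvStep width w step)^[(l.map Int.toNat).sum] st := by
  induction l generalizing st with
  | nil => rfl
  | cons a l ih =>
    rw [regionA_cons, ih, foldl_const_iterate, PySem.List.length_pyRange_one,
      ← Function.iterate_add_apply, List.map_cons, List.sum_cons]
    congr 1
    omega

lemma sumPos_eq (l : List Int) : pvSumPos l = ((l.map Int.toNat).sum : Int) := by
  have h : ∀ a : Int, l.foldl (fun a x => a + max x 0) a = a + ((l.map Int.toNat).sum : Int) := by
    induction l with
    | nil => simp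
    | cons x l ih =>
      intro a
      simp only [List.foldl_cons, ih, List.map_cons, List.sum_cons]
      push_cast
      omega
  simpa using h 0

lemma regionA_eq_place (width w step : Int) (hw : w = 3 ∨ w = 4 ∨ w = 5) (l : List Int) (st : Int × Int) :
    pvRegionA width w step l st = pvPlace width w step (pvSumPos l) st := by
  rw [regionA_iterate, sumPos_eq, iterate_place width step w hw]

lemma pvStep_shift (width w step d : Int) (st : Int × Int) :
    pvStep width w step (st.1, st.2 + d) = ((pvStep width w step st).1, (pvStep width w step st).2 + d) := by
  simp only [pvStep]
  split_ifs with h <;> simp_all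
  ring

lemma iterate_shift (width w step d : Int) (n : Nat) (st : Int × Int) :
    (pvStep width w step)^[n] (st.1, st.2 + d) =
      (((pvStep width w step)^[n] st).1, ((pvStep width w step)^[n] st).2 + d) := by
  induction n generalizing st with
  | zero => rfl
  | succ n ih => rw [Function.iterate_succ_apply, pvStep_shift, ih, Function.iterate_succ_apply]

lemma region44A_cons (width a : Int) (l : List Int) (st : Int × Int) :
    pvRegion44A width (a :: l) st
      = (PySem.List.pyRange 0 a 1).foldl (fun st _ => pvStep width 4 4 st)
          ((pvRegion44A width l st).1, (pvRegion44A width l st).2 + 1) := rfl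

lemma region44A_iterate (width : Int) (l : List Int) (st : Int × Int) :
    pvRegion44A width l st =
      (((pvStep width 4 4)^[(l.map Int.toNat).sum] st).1,
       ((pvStep width 4 4)^[(l.map Int.toNat).sum] st).2 + l.length) := by
  induction l generalizing st with
  | nil => simp [pvRegion44A]
  | cons a l ih =>
    rw [region44A_cons, ih, foldl_const_iterate, PySem.List.length_pyRange_one]
    rw [show (((pvStep width 4 4)^[(l.map Int.toNat).sum] st).1,
          ((pvStep width 4 4)^[(l.map Int.toNat).sum] st).2 + (l.length : Int) + 1)
        = (((pvStep width 4 4)^[(l.map Int.toNat).sum] st).1,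
          ((pvStep width 4 4)^[(l.map Int.toNat).sum] st).2 + ((l.length : Int) + 1)) from by rw [add_assoc]]
    rw [iterate_shift, ← Function.iterate_add_apply]
    simp only [Int.sub_zero, List.map_cons, List.sum_cons, List.length_cons, Prod.mk.injEq]
    exact ⟨trivial, by push_cast; ring⟩

lemma region44A_eq_place (width : Int) (l : List Int) (st : Int × Int) :
    pvRegion44A width l st = pvPlace width 4 4 (pvSumPos l) (st.1, st.2 + l.length) := by
  rw [region44A_iterate, sumPos_eq,
    ← iterate_place width 4 4 (by norm_num), iterate_shift]

-- ===== VERDICT (by name: the statement is the Claim_ definition above) =====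
theorem do_they_fit_spec : Claim_equal_do_they_fit := by
  intro width length r33 r43 r44 r53 _
  unfold Spec_do_they_fit do_they_fit do_they_fit_alt
  rw [regionA_eq_place width 3 3 (by norm_num), regionA_eq_place width 4 3 (by norm_num),
    regionA_eq_place width 5 3 (by norm_num), region44A_eq_place]
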